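-- pv_equiv track=rewrite | github.com/ratioSolver/COCO | ros/ros_interface_generator.py | _to_ros_identifier
-- ===== SOURCE A (Python) =====
-- from typing import Dict, Any, List, Iterable
--
-- def _to_ros_identifier(symbol: str) -> str:
--     result: List[str] = []
--     cap_next = False
--     for char in symbol:
--         if char in {"_", " ", "-"}:
--             cap_next = True
--             continue
--         if cap_next:
--             result.append(char.upper())
--             cap_next = False
--         else:
--             result.append(char)
--     if not result or result[0].isdigit():
--         result.insert(0, "T")
--     else:
--         result[0] = result[0].upper()
--     return "".join(result)
-- ===== SOURCE B (Python) =====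
-- def _to_ros_identifier(symbol: str) -> str:
--     # Tokenize on runs of separators, then capitalize each token's first char and join.
--     tokens = []
--     cur = []
--     for ch in symbol:
--         if ch in "_ -":
--             if cur:
--                 tokens.append("".join(cur))
--                 cur = []
--         else:
--             cur.append(ch)
--     if cur:
--         tokens.append("".join(cur))
--     joined = "".join(t[0].upper() + t[1:] for t in tokens)
--     if not joined or joined[0].isdigit():
--         return "T" + joined
--     return joined
-- ===== Notes on version B (the rewrite author's own statement) =====
-- stated objective: alternative
-- what changed: A's single char-by-char scan with a cap_next flag is replaced by a tokenize-then-transform pass: split the symbol into maximal separator-free runs (separators: underscore, space, hyphen), uppercase each token's first character, join, and apply the same empty/leading-digit guard prepending a T.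
import Mathlib
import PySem

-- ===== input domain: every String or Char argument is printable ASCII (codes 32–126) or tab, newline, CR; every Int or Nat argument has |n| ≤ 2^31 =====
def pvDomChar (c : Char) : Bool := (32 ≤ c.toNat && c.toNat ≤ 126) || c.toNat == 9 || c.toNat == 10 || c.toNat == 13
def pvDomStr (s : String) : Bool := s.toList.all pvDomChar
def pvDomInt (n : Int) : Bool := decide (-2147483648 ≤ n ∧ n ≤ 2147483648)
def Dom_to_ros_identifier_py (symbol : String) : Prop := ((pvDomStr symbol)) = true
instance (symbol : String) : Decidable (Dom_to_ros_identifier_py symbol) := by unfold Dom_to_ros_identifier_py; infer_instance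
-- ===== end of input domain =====

-- B replaces A's single char-by-char scan with a tokenize–capitalize–join decomposition (objective: alternative, same cost).

-- ===== PORT A =====
-- literal port of A: one fold carrying (result, cap_next), then the head fix-up
def to_ros_identifier_py (symbol : String) : String :=
  match (symbol.toList.foldl
    (fun (st : List Char × Bool) c =>
      if c = '_' ∨ c = ' ' ∨ c = '-' then (st.1, true)
      else if st.2 then (st.1 ++ [PySem.Chars.upperChar c], false)
      else (st.1 ++ [c], false)) ([], false)).1 with
  | [] => "T"
  | c :: rest =>
    if PySem.Chars.isdigit c then String.ofList ('T' :: c :: rest)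
    else String.ofList (PySem.Chars.upperChar c :: rest)

-- ===== PORT B =====
-- Source B's manual tokenizer: split `symbol` into maximal separator-free runs
def pvTokens : List Char → List Char → List (List Char)
  | [], cur => if cur = [] then [] else [cur]
  | c :: cs, cur =>
    if c = '_' ∨ c = ' ' ∨ c = '-' then
      if cur = [] then pvTokens cs [] else cur :: pvTokens cs []
    else pvTokens cs (cur ++ [c])

-- Source B's `t[0].upper() + t[1:]`
def pvCapTok : List Char → List Char
  | [] => []
  | c :: cs => PySem.Chars.upperChar c :: cs

def to_ros_identifier_py_alt (symbol : String) : String :=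
  match ((pvTokens symbol.toList []).map pvCapTok).flatten with
  | [] => String.ofList ['T']
  | c :: rest =>
    if PySem.Chars.isdigit c then String.ofList ('T' :: c :: rest)
    else String.ofList (c :: rest)

-- ===== PRECONDITION & SPEC =====
def Spec_to_ros_identifier_py (symbol : String) (out : String) : Prop := out = to_ros_identifier_py_alt symbol
instance (symbol : String) (out : String) : Decidable (Spec_to_ros_identifier_py symbol out) := by unfold Spec_to_ros_identifier_py; infer_instance

-- ===== CLAIM (what is proved, stated in full; the proofs are below) =====
def Claim_equal_to_ros_identifier_py : Prop := ∀ (symbol : String), Dom_to_ros_identifier_py symbol → Spec_to_ros_identifier_py symbol (to_ros_identifier_py symbol)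

-- ===== LEMMAS AND PROOFS =====

-- the characters appended by A's loop from the remaining input and the cap_next flag
def pvScan : List Char → Bool → List Char
  | [], _ => []
  | c :: cs, cap =>
    if c = '_' ∨ c = ' ' ∨ c = '-' then pvScan cs true
    else if cap then PySem.Chars.upperChar c :: pvScan cs false
    else c :: pvScan cs false

theorem pvToNat_le (c d : Char) : c ≤ d ↔ c.toNat ≤ d.toNat := by
  rw [Char.le_def, UInt32.le_iff_toNat_le]; rfl

theorem pvUp_notlower (c : Char) (h : ¬(97 ≤ c.toNat ∧ c.toNat ≤ 122)) :
    PySem.Chars.upperChar c = c := by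
  unfold PySem.Chars.upperChar PySem.Chars.islower
  rw [if_neg]
  simp only [Bool.and_eq_true, decide_eq_true_eq, not_and, pvToNat_le]
  intro h1 h2
  exact absurd ⟨h1, h2⟩ h

theorem pvUp_toNat (c : Char) (h : 97 ≤ c.toNat) (h2 : c.toNat ≤ 122) :
    (PySem.Chars.upperChar c).toNat = c.toNat - 32 := by
  unfold PySem.Chars.upperChar PySem.Chars.islower
  rw [if_pos]
  · rw [Char.toNat_ofNat, if_pos (Or.inl (by omega))]
  · simp only [Bool.and_eq_true, decide_eq_true_eq, pvToNat_le]
    exact ⟨h, h2⟩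

theorem pvUp_up (c : Char) :
    PySem.Chars.upperChar (PySem.Chars.upperChar c) = PySem.Chars.upperChar c := by
  by_cases h : 97 ≤ c.toNat ∧ c.toNat ≤ 122
  · have := pvUp_toNat c h.1 h.2
    exact pvUp_notlower _ (by omega)
  · rw [pvUp_notlower c h, pvUp_notlower c h]

theorem pvIsdigit_iff (c : Char) :
    PySem.Chars.isdigit c = true ↔ (48 ≤ c.toNat ∧ c.toNat ≤ 57) := by
  unfold PySem.Chars.isdigit
  simp [pvToNat_le]

theorem pvIsdigit_up (c : Char) :
    PySem.Chars.isdigit (PySem.Chars.upperChar c) = PySem.Chars.isdigit c := by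
  by_cases h : 97 ≤ c.toNat ∧ c.toNat ≤ 122
  · have h3 := pvUp_toNat c h.1 h.2
    have hu : PySem.Chars.isdigit (PySem.Chars.upperChar c) = false := by
      rw [← Bool.not_eq_true, pvIsdigit_iff]; omega
    have hc : PySem.Chars.isdigit c = false := by
      rw [← Bool.not_eq_true, pvIsdigit_iff]; omega
    rw [hu, hc]
  · rw [pvUp_notlower c h]

theorem pvUp_digit (c : Char) (h : PySem.Chars.isdigit c = true) :
    PySem.Chars.upperChar c = c := by
  rw [pvIsdigit_iff] at h
  exact pvUp_notlower c (by omega)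

-- A's fold appends exactly pvScan
theorem pvFoldl_scan (cs : List Char) (acc : List Char) (cap : Bool) :
    (cs.foldl (fun (st : List Char × Bool) c =>
      if c = '_' ∨ c = ' ' ∨ c = '-' then (st.1, true)
      else if st.2 then (st.1 ++ [PySem.Chars.upperChar c], false)
      else (st.1 ++ [c], false)) (acc, cap)).1 = acc ++ pvScan cs cap := by
  induction cs generalizing acc cap with
  | nil => simp [pvScan]
  | cons c cs ih =>
    by_cases h : c = '_' ∨ c = ' ' ∨ c = '-'
    · simp [pvScan, h, ih]
    · cases cap <;> simp [pvScan, h, ih]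

-- pvCapTok of pvScan with cap=true is a fixed point (its head is already uppercased)
theorem pvCap_scan_true (cs : List Char) :
    pvCapTok (pvScan cs true) = pvScan cs true := by
  induction cs with
  | nil => rfl
  | cons c cs ih =>
    by_cases h : c = '_' ∨ c = ' ' ∨ c = '-'
    · simpa [pvScan, h] using ih
    · simp [pvScan, h, pvCapTok, pvUp_up]

theorem pvScan_true_eq (cs : List Char) :
    pvScan cs true = pvCapTok (pvScan cs false) := by
  induction cs with
  | nil => rfl
  | cons c cs ih =>
    by_cases h : c = '_' ∨ c = ' ' ∨ c = '-'
    · simp [pvScan, h, pvCap_scan_true]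
    · simp [pvScan, h, pvCapTok]

-- tokenize + capitalize + flatten computes pvScan with cap=true
theorem pvTokens_scan (cs : List Char) :
    (∀ (a : Char) (cur : List Char),
        ((pvTokens cs (a :: cur)).map pvCapTok).flatten
          = PySem.Chars.upperChar a :: (cur ++ pvScan cs false)) ∧
    ((pvTokens cs []).map pvCapTok).flatten = pvScan cs true := by
  induction cs with
  | nil => simp [pvTokens, pvScan, pvCapTok]
  | cons c cs ih =>
    constructor
    · intro a cur
      by_cases h : c = '_' ∨ c = ' ' ∨ c = '-'
      · simp [pvTokens, h, pvScan, pvCapTok, ih.2, pvScan_true_eq]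
      · have := ih.1 a (cur ++ [c])
        simp [pvTokens, h, pvScan, this]
    · by_cases h : c = '_' ∨ c = ' ' ∨ c = '-'
      · simp [pvTokens, h, pvScan, ih.2]
      · have := ih.1 c []
        simp [pvTokens, h, pvScan, this]

-- ===== VERDICT (by name: the statement is the Claim_ definition above) =====
theorem to_ros_identifier_py_spec : Claim_equal_to_ros_identifier_py := by
  intro symbol _
  unfold Spec_to_ros_identifier_py to_ros_identifier_py to_ros_identifier_py_alt
  rw [pvFoldl_scan, (pvTokens_scan symbol.toList).2, pvScan_true_eq]
  simp only [List.nil_append]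
  cases h : pvScan symbol.toList false with
  | nil => rfl
  | cons c rest =>
    simp only [pvCapTok, pvIsdigit_up]
    by_cases hd : PySem.Chars.isdigit c = true
    · rw [if_pos hd, if_pos hd, pvUp_digit c hd]
    · rw [if_neg hd, if_neg hd]
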